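-- pv_equiv track=rewrite | github.com/seewhydee/ntuphys_nb | jupyter/demos/mccrypt.py | string_to_chars
-- ===== SOURCE A (Python) =====
-- def string_to_chars(s):
--     charlist = []
--     lastn = 26
--     for k in range(len(s)):
--         n = ord(s[k])
--         ## Downcase
--         if n > 90:
--             n -= 32
--         if n < 65 or n > 90:
--             ## Convert non-ASCII characters to n=26 (character
--             ## separators).  Ignore multiple runs of such chars.
--             if lastn == 26:
--                 continue
--             lastn = 26
--         else:
--             lastn = n - 65
--         charlist.append(lastn)
--     return charlist
-- ===== SOURCE B (Python) =====
-- def string_to_chars(s):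
--     # Pass 1: map each character independently to its code (26 = separator).
--     codes = []
--     for c in s:
--         n = ord(c)
--         if n > 90:
--             n -= 32
--         codes.append(n - 65 if 65 <= n <= 90 else 26)
--     # Pass 2: collapse runs of separators and drop leading separators.
--     out = []
--     for c in codes:
--         if c == 26 and (not out or out[-1] == 26):
--             continue
--         out.append(c)
--     return out
-- ===== Notes on version B (the rewrite author's own statement) =====
-- stated objective: alternative
-- what changed: Replaces A's single stateful loop carrying lastn with two passes: a per-character map to codes (26 = separator) followed by a collapse pass that drops leading and repeated separators by inspecting the output's last element.
import Mathlib
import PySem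

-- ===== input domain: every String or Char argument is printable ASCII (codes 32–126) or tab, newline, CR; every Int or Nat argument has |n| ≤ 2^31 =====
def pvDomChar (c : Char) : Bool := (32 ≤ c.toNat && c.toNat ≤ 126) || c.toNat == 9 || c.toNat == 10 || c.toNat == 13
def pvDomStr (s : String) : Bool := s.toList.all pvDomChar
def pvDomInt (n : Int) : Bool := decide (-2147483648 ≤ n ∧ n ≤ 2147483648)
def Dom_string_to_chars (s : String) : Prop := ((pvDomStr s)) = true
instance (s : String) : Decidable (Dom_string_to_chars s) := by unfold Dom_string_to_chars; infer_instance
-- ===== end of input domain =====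

-- B replaces A's single stateful loop by a per-character map pass followed by a
-- separator-collapse pass over the produced codes (objective: alternative decomposition).

-- ===== PORT A =====
-- A's loop: state (charlist, lastn), one step per character of s.
-- n = ord(c), downcased as in A ('if n > 90: n -= 32')
def pvDownA (c : Char) : Int :=
  if (c.toNat : Int) > 90 then (c.toNat : Int) - 32 else (c.toNat : Int)

def pvStepA (st : List Int × Int) (c : Char) : List Int × Int :=
  if pvDownA c < 65 ∨ pvDownA c > 90 then
    if st.2 = 26 then st
    else (st.1 ++ [26], 26)
  else (st.1 ++ [pvDownA c - 65], pvDownA c - 65)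

def string_to_chars (s : String) : List Int :=
  (s.toList.foldl pvStepA ([], 26)).1

-- ===== PORT B =====
-- Pass 1: each character independently to its code (26 = separator).
-- n = ord(c) downcased ('if n > 90: n -= 32')
def pvDownB (c : Char) : Int :=
  if (c.toNat : Int) > 90 then (c.toNat : Int) - 32 else (c.toNat : Int)

def pvCodeB (c : Char) : Int :=
  if 65 ≤ pvDownB c ∧ pvDownB c ≤ 90 then pvDownB c - 65 else 26

-- Pass 2: append each code, skipping a 26 when the output is empty or already ends in 26.
def pvCollapse (out : List Int) (c : Int) : List Int :=
  if c = 26 ∧ (out = [] ∨ out.getLast? = some 26) then out else out ++ [c]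

def string_to_chars_alt (s : String) : List Int :=
  (s.toList.map pvCodeB).foldl pvCollapse []

-- ===== PRECONDITION & SPEC =====
def Spec_string_to_chars (s : String) (out : List Int) : Prop := out = string_to_chars_alt s
instance (s : String) (out : List Int) : Decidable (Spec_string_to_chars s out) := by unfold Spec_string_to_chars; infer_instance

-- ===== CLAIM (what is proved, stated in full; the proofs are below) =====
def Claim_equal_string_to_chars : Prop := ∀ (s : String), Dom_string_to_chars s → Spec_string_to_chars s (string_to_chars s)

-- ===== LEMMAS AND PROOFS =====

-- Invariant linking A's carried `lastn` to the last element of the output so far.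
def pvInv (acc : List Int) (lastn : Int) : Prop :=
  (acc = [] ∧ lastn = 26) ∨ acc.getLast? = some lastn

theorem pvInv_sep (acc : List Int) (lastn : Int) (h : pvInv acc lastn) :
    lastn = 26 ↔ (acc = [] ∨ acc.getLast? = some 26) := by
  rcases h with ⟨h1, h2⟩ | h
  · subst h1; simp [h2]
  · constructor
    · intro hl; right; rw [h, hl]
    · rintro (hl | hl)
      · simp [hl] at h
      · rw [h] at hl; exact (Option.some_inj.mp hl)

theorem pvDown_eq (c : Char) : pvDownB c = pvDownA c := rfl

theorem pvLoop_eq (l : List Char) (acc : List Int) (lastn : Int) (h : pvInv acc lastn) :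
    (l.foldl pvStepA (acc, lastn)).1 = (l.map pvCodeB).foldl pvCollapse acc := by
  induction l generalizing acc lastn with
  | nil => simp
  | cons c t ih =>
    simp only [List.foldl_cons, List.map_cons]
    by_cases hc : (pvDownA c < 65 ∨ pvDownA c > 90)
    · -- separator character
      have hcode : pvCodeB c = 26 := by
        unfold pvCodeB; rw [pvDown_eq, if_neg]; omega
      by_cases hl : lastn = 26
      · have hskip : pvCollapse acc (pvCodeB c) = acc := by
          rw [hcode]; unfold pvCollapse
          rw [if_pos ⟨rfl, (pvInv_sep acc lastn h).mp hl⟩]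
        rw [hskip]
        have hst : pvStepA (acc, lastn) c = (acc, lastn) := by
          unfold pvStepA; rw [if_pos hc]; simp [hl]
        rw [hst]; exact ih acc lastn h
      · have happ : pvCollapse acc (pvCodeB c) = acc ++ [26] := by
          rw [hcode]; unfold pvCollapse
          rw [if_neg]
          intro ⟨_, h2⟩
          exact hl ((pvInv_sep acc lastn h).mpr h2)
        rw [happ]
        have hst : pvStepA (acc, lastn) c = (acc ++ [26], 26) := by
          unfold pvStepA; rw [if_pos hc]; simp [hl]
        rw [hst]
        exact ih (acc ++ [26]) 26 (Or.inr (by simp))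
    · -- letter character
      have hcode : pvCodeB c = pvDownA c - 65 := by
        unfold pvCodeB; rw [pvDown_eq, if_pos (by omega)]
      have happ : pvCollapse acc (pvCodeB c) = acc ++ [pvDownA c - 65] := by
        rw [hcode]; unfold pvCollapse
        rw [if_neg]; intro ⟨h1, _⟩; omega
      rw [happ]
      have hst : pvStepA (acc, lastn) c = (acc ++ [pvDownA c - 65], pvDownA c - 65) := by
        unfold pvStepA; rw [if_neg hc]
      rw [hst]
      exact ih (acc ++ [pvDownA c - 65]) (pvDownA c - 65) (Or.inr (by simp))

-- ===== VERDICT (by name: the statement is the Claim_ definition above) =====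
theorem string_to_chars_spec : Claim_equal_string_to_chars := by
  intro s _
  unfold Spec_string_to_chars string_to_chars string_to_chars_alt
  exact pvLoop_eq s.toList [] 26 (Or.inl ⟨rfl, rfl⟩)
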